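-- pv_equiv track=rewrite | github.com/thgoc/gerador_faixas | gerador_faixas.py | construir_tabela_linear
-- ===== SOURCE A (Python) =====
-- import math
--
-- def construir_tabela_linear(ordered_vars, niveis_por_var):
--     ks = [len(niveis_por_var[v]) for v in ordered_vars]
--     total_rows = math.prod(ks)
--     blocks = []
--     prod_right = 1
--     for i in range(len(ks) - 1, -1, -1):
--         blocks.append(prod_right)
--         prod_right *= ks[i]
--     blocks = list(reversed(blocks))
--
--     linhas_vals = []
--     for r in range(total_rows):
--         row_vals = []
--         for i, v in enumerate(ordered_vars):
--             j = (r // blocks[i]) % ks[i]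
--             row_vals.append(niveis_por_var[v][j])
--         linhas_vals.append(row_vals)
--     return linhas_vals, ks, blocks
-- ===== SOURCE B (Python) =====
-- def _product(levels):
--     # Cartesian product, rightmost list varying fastest, rows as lists.
--     if not levels:
--         return [[]]
--     rest = _product(levels[1:])
--     return [[x] + row for x in levels[0] for row in rest]
--
--
-- def construir_tabela_linear(ordered_vars, niveis_por_var):
--     levels = [niveis_por_var[v] for v in ordered_vars]
--     ks = [len(l) for l in levels]
--     blocks = []
--     p = 1
--     for k in reversed(ks):
--         blocks.append(p)
--         p *= k
--     blocks.reverse()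
--     return _product(levels), ks, blocks
-- ===== Notes on version B (the rewrite author's own statement) =====
-- stated objective: alternative
-- what changed: B builds the row table by a structural recursion computing the Cartesian product of the level lists directly (rightmost varying fastest), instead of A's per-cell mixed-radix decode (r//blocks[i])%ks[i] over all row indices; the blocks list is accumulated over reversed(ks) directly instead of A's index-based countdown loop.
import Mathlib
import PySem

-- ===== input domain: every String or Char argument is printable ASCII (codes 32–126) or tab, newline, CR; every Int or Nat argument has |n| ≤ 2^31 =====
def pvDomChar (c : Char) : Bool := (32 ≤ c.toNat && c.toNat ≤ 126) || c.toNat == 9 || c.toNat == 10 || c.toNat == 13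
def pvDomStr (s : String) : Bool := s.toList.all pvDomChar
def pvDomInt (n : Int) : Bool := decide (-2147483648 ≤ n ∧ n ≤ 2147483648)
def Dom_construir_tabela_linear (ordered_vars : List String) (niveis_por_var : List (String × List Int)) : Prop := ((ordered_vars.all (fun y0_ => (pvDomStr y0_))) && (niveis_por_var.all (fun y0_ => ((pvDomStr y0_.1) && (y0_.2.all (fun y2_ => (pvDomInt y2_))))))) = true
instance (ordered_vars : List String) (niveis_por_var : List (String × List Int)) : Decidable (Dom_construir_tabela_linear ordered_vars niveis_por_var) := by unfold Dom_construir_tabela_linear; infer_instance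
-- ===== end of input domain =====

-- B replaces A's per-cell div/mod odometer decode by a structural recursion building the
-- Cartesian product of the level lists directly (objective: alternative enumeration strategy).

-- ===== PORT A =====
def construir_tabela_linear (ordered_vars : List String) (niveis_por_var : List (String × List Int)) : List (List Int) × List Int × List Int :=
  let nvd := PySem.Dict.mk niveis_por_var
  let ks : List Int := ordered_vars.map (fun v => (((nvd.get? v).getD []).length : Int))
  let total_rows : Int := ks.foldl (· * ·) 1
  let st := (PySem.List.pyRange ((ks.length : Int) - 1) (-1) (-1)).foldl
      (fun (st : List Int × Int) i => (st.1 ++ [st.2], st.2 * PySem.List.pyGetD ks i 0)) ([], 1)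
  let blocks := st.1.reverse
  let linhas_vals := (PySem.List.pyRange 0 total_rows 1).foldl
      (fun acc r => acc ++ [
        (PySem.List.enumerate ordered_vars).foldl
          (fun row iv =>  -- j = (r // blocks[i]) % ks[i], inlined
            row ++ [PySem.List.pyGetD ((nvd.get? iv.2).getD [])
              (PySem.Int.mod (PySem.Int.floordiv r (PySem.List.pyGetD blocks iv.1 0)) (PySem.List.pyGetD ks iv.1 0)) 0]) [] ]) []
  (linhas_vals, ks, blocks)

-- ===== PORT B =====
-- _product: Cartesian product by structural recursion (Source B's _product)
def pvProduct (levels : List (List Int)) : List (List Int) :=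
  match levels with
  | [] => [[]]
  | l :: rest => l.flatMap (fun x => (pvProduct rest).map (fun row => x :: row))

def construir_tabela_linear_alt (ordered_vars : List String) (niveis_por_var : List (String × List Int)) : List (List Int) × List Int × List Int :=
  let nvd := PySem.Dict.mk niveis_por_var
  let levels := ordered_vars.map (fun v => (nvd.get? v).getD [])
  let ks : List Int := levels.map (fun l => (l.length : Int))
  let st := ks.reverse.foldl (fun (st : List Int × Int) k => (st.1 ++ [st.2], st.2 * k)) ([], 1)
  let blocks := st.1.reverse
  (pvProduct levels, ks, blocks)

-- ===== PRECONDITION & SPEC =====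
-- Pre_ excludes exactly the inputs where some variable in ordered_vars is not a key of
-- niveis_por_var: there Python A (and Python B alike) raises KeyError.
def Pre_construir_tabela_linear (ordered_vars : List String) (niveis_por_var : List (String × List Int)) : Prop :=
  ∀ v ∈ ordered_vars, (PySem.Dict.mk niveis_por_var).contains v = true
instance (ordered_vars : List String) (niveis_por_var : List (String × List Int)) : Decidable (Pre_construir_tabela_linear ordered_vars niveis_por_var) := by unfold Pre_construir_tabela_linear; infer_instance

def pvWitness_construir_tabela_linear : List String × (List (String × List Int)) :=
  (["x", "y"], [("x", [1, 2]), ("y", [3, 4, 5])])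

def Spec_construir_tabela_linear (ordered_vars : List String) (niveis_por_var : List (String × List Int)) (out : List (List Int) × List Int × List Int) : Prop := out = construir_tabela_linear_alt ordered_vars niveis_por_var
instance (ordered_vars : List String) (niveis_por_var : List (String × List Int)) (out : List (List Int) × List Int × List Int) : Decidable (Spec_construir_tabela_linear ordered_vars niveis_por_var out) := by unfold Spec_construir_tabela_linear; infer_instance

-- ===== CLAIM (what is proved, stated in full; the proofs are below) =====
def Claim_equal_construir_tabela_linear : Prop := ∀ (ordered_vars : List String) (niveis_por_var : List (String × List Int)), Dom_construir_tabela_linear ordered_vars niveis_por_var → Pre_construir_tabela_linear ordered_vars niveis_por_var → Spec_construir_tabela_linear ordered_vars niveis_por_var (construir_tabela_linear ordered_vars niveis_por_var)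

-- ===== LEMMAS AND PROOFS =====

-- Nat-level description of A's mixed-radix decode over the list of level lists.
def pvTot : List (List Int) → Nat
  | [] => 1
  | l :: rest => l.length * pvTot rest

def pvBlk : List (List Int) → List Nat
  | [] => []
  | _ :: rest => pvTot rest :: pvBlk rest

def pvDecode : List (List Int) → Nat → List Int
  | [], _ => []
  | l :: rest, r => l.getD (r / pvTot rest % l.length) 0 :: pvDecode rest r

-- Int-level suffix products of a ks list (what both blocks loops compute).
def pvProdI : List Int → Int
  | [] => 1
  | k :: rest => pvProdI rest * k

def pvBlkI : List Int → List Int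
  | [] => []
  | _ :: rest => pvProdI rest :: pvBlkI rest

-- The reverse-and-accumulate loop (B's blocks loop) computes the suffix products.
theorem pv_revacc (ks : List Int) :
    ks.reverse.foldl (fun (st : List Int × Int) k => (st.1 ++ [st.2], st.2 * k)) ([], 1)
      = ((pvBlkI ks).reverse, pvProdI ks) := by
  induction ks with
  | nil => rfl
  | cons k rest ih => simp [List.foldl_append, ih, pvBlkI, pvProdI]

-- Folding over range(len l) with getD is folding over l.
theorem pv_foldl_range_getD {α β : Type} (f : β → α → β) (d : α) :
    ∀ (l : List α) (init : β),
      (List.range l.length).foldl (fun st k => f st (l.getD k d)) init = l.foldl f init := by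
  intro l
  induction l with
  | nil => intro init; rfl
  | cons x xs ih =>
    intro init
    simp [List.range_succ_eq_map, List.foldl_map]
    exact ih (f init x)

-- A's countdown-indexed blocks loop equals B's loop over ks.reverse.
theorem pv_blocksA (ks : List Int) :
    (PySem.List.pyRange ((ks.length : Int) - 1) (-1) (-1)).foldl
        (fun (st : List Int × Int) i => (st.1 ++ [st.2], st.2 * PySem.List.pyGetD ks i 0)) ([], 1)
      = ks.reverse.foldl (fun (st : List Int × Int) k => (st.1 ++ [st.2], st.2 * k)) ([], 1) := by
  rw [PySem.List.pyRange_neg_one, List.foldl_map]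
  have hlen : ((ks.length : Int) - 1 - (-1)).toNat = ks.length := by omega
  rw [hlen]
  have h1 : ∀ (st : List Int × Int), ∀ k ∈ List.range ks.length,
      (fun (st : List Int × Int) (k : Nat) => (st.1 ++ [st.2], st.2 * PySem.List.pyGetD ks ((ks.length : Int) - 1 - (k : Int)) 0)) st k
        = (fun (st : List Int × Int) (k : Nat) => (st.1 ++ [st.2], st.2 * ks.reverse.getD k 0)) st k := by
    intro st k hk
    simp only [List.mem_range] at hk
    have hc : ((ks.length : Int) - 1 - (k : Int)) = ((ks.length - 1 - k : Nat) : Int) := by omega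
    simp only [hc, PySem.List.pyGetD_natCast]
    have hk' : k < ks.reverse.length := by simpa using hk
    rw [List.getD_eq_getElem _ _ hk', List.getElem_reverse,
        List.getD_eq_getElem _ _ (by omega : ks.length - 1 - k < ks.length)]
  rw [PySem.List.foldl_congr_mem _ _ _ _ h1]
  have h2 := pv_foldl_range_getD (fun (st : List Int × Int) k => (st.1 ++ [st.2], st.2 * k)) (0:Int) ks.reverse ([], 1)
  simpa using h2

theorem pv_prodI_eq_prod (ks : List Int) : pvProdI ks = ks.prod := by
  induction ks with
  | nil => rfl
  | cons k rest ih => simp [pvProdI, ih, mul_comm]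

theorem pv_prodI_eq_foldl (ks : List Int) : pvProdI ks = ks.foldl (· * ·) 1 := by
  rw [pv_prodI_eq_prod, List.prod_eq_foldl]

-- bridges to the Nat level
theorem pv_prodI_cast (levels : List (List Int)) :
    pvProdI (levels.map (fun l => (l.length : Int))) = (pvTot levels : Int) := by
  induction levels with
  | nil => rfl
  | cons l rest ih => simp [pvProdI, pvTot, ih]; ring

theorem pv_blkI_cast (levels : List (List Int)) :
    pvBlkI (levels.map (fun l => (l.length : Int))) = (pvBlk levels).map (fun (n : Nat) => (n : Int)) := by
  induction levels with
  | nil => rfl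
  | cons l rest ih => simp [pvBlkI, pvBlk, ih, pv_prodI_cast]

-- decode is index-pointwise
theorem pv_decode_entries (levels : List (List Int)) (r : Nat) :
    pvDecode levels r
      = (List.range levels.length).map
          (fun i => (levels.getD i []).getD (r / (pvBlk levels).getD i 0 % (levels.getD i []).length) 0) := by
  induction levels generalizing r with
  | nil => rfl
  | cons l rest ih =>
    simp only [pvDecode, pvBlk, List.length_cons, List.range_succ_eq_map, List.map_cons,
      List.map_map, List.getD_cons_zero]
    rw [ih]
    rfl

-- decode only depends on r modulo the total
theorem pv_decode_mod (levels : List (List Int)) (c r : Nat) :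
    pvDecode levels (c * pvTot levels + r) = pvDecode levels r := by
  induction levels generalizing c r with
  | nil => rfl
  | cons l rest ih =>
    by_cases hT : pvTot rest = 0
    · simp [pvTot, hT]
    · have hT' : 0 < pvTot rest := Nat.pos_of_ne_zero hT
      simp only [pvDecode, pvTot]
      congr 1
      · have h1 : (c * (l.length * pvTot rest) + r) / pvTot rest = r / pvTot rest + c * l.length := by
          rw [show c * (l.length * pvTot rest) + r = pvTot rest * (c * l.length) + r by ring,
              Nat.mul_add_div hT']
          omega
        rw [h1, Nat.add_mul_mod_self_right]
      · rw [show c * (l.length * pvTot rest) + r = (c * l.length) * pvTot rest + r by ring, ih]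

theorem pv_range_mul {T : Nat} (f : Nat → List Int) :
    ∀ (a : Nat), (List.range (a * T)).map f
      = (List.range a).flatMap (fun q => (List.range T).map (fun s => f (q * T + s))) := by
  intro a
  induction a with
  | zero => simp
  | succ a ih =>
    rw [show (a + 1) * T = a * T + T by ring, List.range_add, List.map_append, ih,
        List.range_succ, List.flatMap_append]
    simp [List.map_map, Function.comp]

theorem pv_map_getD_range (l : List Int) :
    (List.range l.length).map (fun q => l.getD q 0) = l := by
  apply List.ext_getElem
  · simp
  · intro i h1 h2
    rw [List.getElem_map, List.getElem_range, List.getD_eq_getElem _ _ (by simpa using h2)]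

-- the decode of every row index, in order, is exactly the Cartesian product
theorem pv_cart (levels : List (List Int)) :
    (List.range (pvTot levels)).map (pvDecode levels) = pvProduct levels := by
  induction levels with
  | nil => rfl
  | cons l rest ih =>
    show (List.range (l.length * pvTot rest)).map (pvDecode (l :: rest)) = _
    rw [pv_range_mul]
    have hpt : ∀ q ∈ List.range l.length,
        (List.range (pvTot rest)).map (fun s => pvDecode (l :: rest) (q * pvTot rest + s))
          = (pvProduct rest).map (fun row => l.getD q 0 :: row) := by
      intro q hq
      simp only [List.mem_range] at hq
      have hstep : ∀ s ∈ List.range (pvTot rest),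
          pvDecode (l :: rest) (q * pvTot rest + s) = l.getD q 0 :: pvDecode rest s := by
        intro s hs
        simp only [List.mem_range] at hs
        have hT : 0 < pvTot rest := Nat.pos_of_ne_zero (by omega)
        simp only [pvDecode]
        congr 1
        · congr 2
          rw [show q * pvTot rest + s = pvTot rest * q + s by ring, Nat.mul_add_div hT,
              Nat.div_eq_of_lt hs, Nat.add_zero, Nat.mod_eq_of_lt hq]
        · rw [pv_decode_mod rest q s]
      rw [List.map_congr_left hstep, ← ih, List.map_map]
      rfl
    rw [List.flatMap_congr hpt]
    show _ = l.flatMap (fun x => (pvProduct rest).map (fun row => x :: row))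
    conv_rhs => rw [← pv_map_getD_range l]
    rw [List.flatMap_map]

-- main equality
theorem pv_main (ordered_vars : List String) (niveis_por_var : List (String × List Int)) :
    construir_tabela_linear ordered_vars niveis_por_var
      = construir_tabela_linear_alt ordered_vars niveis_por_var := by
  simp only [construir_tabela_linear, construir_tabela_linear_alt]
  have hks : ordered_vars.map (fun v => ((((PySem.Dict.mk niveis_por_var).get? v).getD []).length : Int))
      = (ordered_vars.map (fun v => ((PySem.Dict.mk niveis_por_var).get? v).getD [])).map (fun l => (l.length : Int)) := by
    rw [List.map_map]; rfl
  rw [hks]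
  set nvd := PySem.Dict.mk niveis_por_var with hnvd
  set levels := ordered_vars.map (fun v => (nvd.get? v).getD []) with hlev
  set ksB : List Int := levels.map (fun l => (l.length : Int)) with hksB
  rw [pv_blocksA ksB, pv_revacc ksB, pv_blkI_cast levels]
  have htot : ksB.foldl (· * ·) 1 = ((pvTot levels : Nat) : Int) := by
    rw [← pv_prodI_eq_foldl, hksB, pv_prodI_cast]
  rw [htot]
  refine Prod.ext ?_ rfl
  show (PySem.List.pyRange 0 ((pvTot levels : Nat) : Int) 1).foldl _ [] = pvProduct levels
  rw [PySem.List.foldl_append_singleton_eq_map, List.nil_append,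
      PySem.List.pyRange_zero_natCast, List.map_map, ← pv_cart levels]
  apply List.map_congr_left
  intro r hr
  simp only [List.mem_range] at hr
  show (PySem.List.enumerate ordered_vars).foldl _ [] = pvDecode levels r
  rw [PySem.List.foldl_append_singleton_eq_map, List.nil_append,
      PySem.List.enumerate_eq_map_pyRange ordered_vars "", PySem.List.len_eq,
      PySem.List.pyRange_zero_natCast, List.map_map, List.map_map, pv_decode_entries levels r,
      show levels.length = ordered_vars.length from List.length_map ..]
  have hlevlen : levels.length = ordered_vars.length := List.length_map ..
  simp only [List.reverse_reverse]
  apply List.map_congr_left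
  intro i hi
  simp only [List.mem_range] at hi
  simp only [Function.comp_apply]
  have hi' : i < levels.length := by omega
  have e1 : PySem.List.pyGetD ordered_vars ((i : Nat) : Int) "" = ordered_vars[i] := by
    rw [PySem.List.pyGetD_natCast, List.getD_eq_getElem _ _ hi]
  have e2 : (nvd.get? ordered_vars[i]).getD [] = levels.getD i [] := by
    rw [hlev, List.getD_eq_getElem _ _ (by simpa using hi), List.getElem_map]
  have e3 : PySem.List.pyGetD ((pvBlk levels).map (fun (n : Nat) => (n : Int))) ((i : Nat) : Int) 0
      = (((pvBlk levels).getD i 0 : Nat) : Int) := by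
    rw [PySem.List.pyGetD_natCast]
    exact List.getD_map (pvBlk levels) 0 _
  have e4 : PySem.List.pyGetD ksB ((i : Nat) : Int) 0 = (((levels.getD i []).length : Nat) : Int) := by
    rw [PySem.List.pyGetD_natCast, hksB,
        List.getD_eq_getElem _ _ (by simpa using hi'), List.getElem_map,
        ← List.getD_eq_getElem levels [] hi']
  rw [e1, e2, e3, e4, PySem.Int.floordiv_natCast, PySem.Int.mod_natCast, PySem.List.pyGetD_natCast]

-- ===== VERDICT (by name: the statement is the Claim_ definition above) =====
theorem construir_tabela_linear_spec : Claim_equal_construir_tabela_linear := by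
  intro ov nv _ _
  exact pv_main ov nv
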